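-- pv_equiv track=rewrite | github.com/Mattatorito/Mailing | src/validation/email_validator.py | _is_similar_domain
-- ===== SOURCE A (Python) =====
-- def _is_similar_domain(domain1: str, domain2: str) -> bool:
--     """Проверяет похожесть доменов."""
--     # Простая проверка на опечатки
--     if abs(len(domain1) - len(domain2)) > 2:
--         return False
--
--     # Используем расстояние Левенштейна (упрощенная версия)
--     def levenshtein_distance(s1: str, s2: str) -> int:
--         if len(s1) < len(s2):
--             return levenshtein_distance(s2, s1)
--
--         if len(s2) == 0:
--             return len(s1)
--
--         previous_row = list(range(len(s2) + 1))
--         for i, c1 in enumerate(s1):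
--             current_row = [i + 1]
--             for j, c2 in enumerate(s2):
--                 insertions = previous_row[j + 1] + 1
--                 deletions = current_row[j] + 1
--                 substitutions = previous_row[j] + (c1 != c2)
--                 current_row.append(min(insertions, deletions, substitutions))
--             previous_row = current_row
--
--         return previous_row[-1]
--
--     distance = levenshtein_distance(domain1, domain2)
--
--     # Считаем похожими, если расстояние не больше 2
--     return distance <= 2
-- ===== SOURCE B (Python) =====
-- def _is_similar_domain(domain1: str, domain2: str) -> bool:
--     n, m = len(domain1), len(domain2)
--     if abs(n - m) > 2:
--         return False
--
--     # Bounded edit-distance search (budget k=2): strip the longest common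
--     # suffix iteratively, then branch on the three edit operations with a
--     # decremented budget; recursion depth is at most 2.
--     def go(i: int, j: int, k: int) -> bool:
--         while i > 0 and j > 0 and domain1[i - 1] == domain2[j - 1]:
--             i -= 1
--             j -= 1
--         if i == 0:
--             return j <= k
--         if j == 0:
--             return i <= k
--         if k == 0:
--             return False
--         return go(i - 1, j, k - 1) or go(i, j - 1, k - 1) or go(i - 1, j - 1, k - 1)
--
--     return go(n, m, 2)
-- ===== Notes on version B (the rewrite author's own statement) =====
-- stated objective: faster
-- what changed: Replaces the full (n+1)x(m+1) Levenshtein dynamic-programming table by a budget-2 bounded edit-distance search: a loop strips the longest common suffix, then the three edit operations are tried with a decremented budget (recursion depth at most 2).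
import Mathlib
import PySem

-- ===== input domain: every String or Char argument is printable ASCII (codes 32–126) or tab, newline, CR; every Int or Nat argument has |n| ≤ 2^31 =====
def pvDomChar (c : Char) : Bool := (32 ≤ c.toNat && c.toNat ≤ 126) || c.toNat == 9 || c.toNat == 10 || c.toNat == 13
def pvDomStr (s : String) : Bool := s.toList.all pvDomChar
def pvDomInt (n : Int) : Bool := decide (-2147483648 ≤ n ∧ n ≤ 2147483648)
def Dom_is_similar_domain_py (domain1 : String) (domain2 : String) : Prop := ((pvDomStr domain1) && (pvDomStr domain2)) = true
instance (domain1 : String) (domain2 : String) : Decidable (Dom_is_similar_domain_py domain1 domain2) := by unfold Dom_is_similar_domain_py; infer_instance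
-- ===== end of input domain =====

-- ===== PORT A =====
-- B replaces the full DP table by a budget-2 bounded search with common-suffix trimming; faster on long inputs.
-- A-side helpers: the inner and outer loops of A's dynamic program, state = (row, counter)
-- (Python rows hold nonnegative ints throughout; they are ported as ℕ, faithful on every input).
def levInnerF (prev : List Nat) (c1 : Char) (st2 : List Nat × Nat) (c2 : Char) : List Nat × Nat :=
  let j := st2.2
  let insertions := prev.getD (j + 1) 0 + 1
  let deletions := st2.1.getD j 0 + 1
  let substitutions := prev.getD j 0 + (if c1 = c2 then 0 else 1)
  (st2.1 ++ [min insertions (min deletions substitutions)], j + 1)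

def levOuterF (s2 : List Char) (st : List Nat × Nat) (c1 : Char) : List Nat × Nat :=
  let current_row := s2.foldl (levInnerF st.1 c1) ([st.2 + 1], 0)
  (current_row.1, st.2 + 1)

-- Python's local levenshtein_distance: swap so s1 is the longer, then row-by-row DP.
def levDistA (s1 s2 : List Char) : Nat :=
  if s1.length < s2.length then
    levDistA s2 s1
  else if s2.length = 0 then
    s1.length
  else
    ((s1.foldl (levOuterF s2) (List.range (s2.length + 1), 0)).1).getLast?.getD 0
    -- previous_row[-1]; the row is nonempty, so getLast? is some
termination_by (if s1.length < s2.length then 1 else 0)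
decreasing_by simp_all; omega

def is_similar_domain_py (domain1 : String) (domain2 : String) : Bool :=
  let s1 := domain1.toList
  let s2 := domain2.toList
  if ((s1.length : Int) - (s2.length : Int)).natAbs > 2 then false
  else decide (levDistA s1 s2 ≤ 2)

-- ===== PORT B =====
-- Source B's go(i, j, k): the while loop trimming a common suffix is the first (tail-recursive) branch;
-- the other branches transcribe go's returns. Recursion is on (k, i+j). domain1[i-1] is in range
-- whenever read (i ≥ 1), ported as getD.
def goB (s1 s2 : List Char) (i j k : Nat) : Bool :=
  if 0 < i ∧ 0 < j ∧ s1.getD (i - 1) ' ' = s2.getD (j - 1) ' ' then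
    goB s1 s2 (i - 1) (j - 1) k
  else if i = 0 then decide (j ≤ k)
  else if j = 0 then decide (i ≤ k)
  else if k = 0 then false
  else goB s1 s2 (i - 1) j (k - 1) || goB s1 s2 i (j - 1) (k - 1) || goB s1 s2 (i - 1) (j - 1) (k - 1)
termination_by (k, i + j)
decreasing_by all_goals first
  | exact Prod.Lex.right _ (by omega)
  | exact Prod.Lex.left _ _ (by omega)

def is_similar_domain_py_alt (domain1 : String) (domain2 : String) : Bool :=
  let s1 := domain1.toList
  let s2 := domain2.toList
  if ((s1.length : Int) - (s2.length : Int)).natAbs > 2 then false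
  else goB s1 s2 s1.length s2.length 2

-- ===== PRECONDITION & SPEC =====
def Spec_is_similar_domain_py (domain1 : String) (domain2 : String) (out : Bool) : Prop := out = is_similar_domain_py_alt domain1 domain2
instance (domain1 : String) (domain2 : String) (out : Bool) : Decidable (Spec_is_similar_domain_py domain1 domain2 out) := by unfold Spec_is_similar_domain_py; infer_instance

-- ===== CLAIM (what is proved, stated in full; the proofs are below) =====
def Claim_equal_is_similar_domain_py : Prop := ∀ (domain1 : String) (domain2 : String), Dom_is_similar_domain_py domain1 domain2 → Spec_is_similar_domain_py domain1 domain2 (is_similar_domain_py domain1 domain2)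

-- ===== LEMMAS AND PROOFS =====

-- Reference prefix edit distance: levP s1 s2 i j is the Levenshtein distance of s1[:i] and s2[:j].
def levP (s1 s2 : List Char) : Nat → Nat → Nat
  | 0, j => j
  | i + 1, 0 => i + 1
  | i + 1, j + 1 =>
      min (levP s1 s2 i (j + 1) + 1)
        (min (levP s1 s2 (i + 1) j + 1)
          (levP s1 s2 i j + (if s1.getD i ' ' = s2.getD j ' ' then 0 else 1)))
termination_by i j => i + j

lemma levP_zero_left (s1 s2 : List Char) (j : Nat) : levP s1 s2 0 j = j := by
  simp [levP]

lemma levP_zero_right (s1 s2 : List Char) (i : Nat) : levP s1 s2 i 0 = i := by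
  cases i <;> simp [levP]

lemma levP_succ_succ (s1 s2 : List Char) (i j : Nat) :
    levP s1 s2 (i + 1) (j + 1) =
      min (levP s1 s2 i (j + 1) + 1)
        (min (levP s1 s2 (i + 1) j + 1)
          (levP s1 s2 i j + (if s1.getD i ' ' = s2.getD j ' ' then 0 else 1))) := by
  simp [levP]

lemma levP_step_left (s1 s2 : List Char) (i j : Nat) :
    levP s1 s2 (i + 1) j ≤ levP s1 s2 i j + 1 := by
  cases j with
  | zero => simp [levP_zero_right]
  | succ j => rw [levP_succ_succ]; omega

lemma levP_step_right (s1 s2 : List Char) (i j : Nat) :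
    levP s1 s2 i (j + 1) ≤ levP s1 s2 i j + 1 := by
  cases i with
  | zero => simp [levP_zero_left]
  | succ i => rw [levP_succ_succ]; omega

lemma levP_le_step_right (s1 s2 : List Char) (a b : Nat) :
    levP s1 s2 a b ≤ levP s1 s2 a (b + 1) + 1 := by
  induction a with
  | zero => simp [levP_zero_left]; omega
  | succ a ih =>
      rw [levP_succ_succ s1 s2 a b]
      have h1 : levP s1 s2 (a + 1) b ≤ levP s1 s2 a b + 1 := levP_step_left s1 s2 a b
      have h2 : levP s1 s2 a b ≤ levP s1 s2 a (b + 1) + 1 := ih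
      split <;> omega

lemma levP_le_step_left (s1 s2 : List Char) (a b : Nat) :
    levP s1 s2 a b ≤ levP s1 s2 (a + 1) b + 1 := by
  induction b with
  | zero => simp [levP_zero_right]; omega
  | succ b ih =>
      rw [levP_succ_succ s1 s2 a b]
      have h1 : levP s1 s2 a (b + 1) ≤ levP s1 s2 a b + 1 := levP_step_right s1 s2 a b
      have h2 : levP s1 s2 a b ≤ levP s1 s2 (a + 1) b + 1 := ih
      split <;> omega

lemma levP_trim (s1 s2 : List Char) (i j : Nat)
    (h : s1.getD i ' ' = s2.getD j ' ') :
    levP s1 s2 (i + 1) (j + 1) = levP s1 s2 i j := by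
  rw [levP_succ_succ, if_pos h]
  have h1 := levP_le_step_right s1 s2 i j
  have h2 := levP_le_step_left s1 s2 i j
  omega

lemma levP_symm (s1 s2 : List Char) (i j : Nat) :
    levP s1 s2 i j = levP s2 s1 j i := by
  fun_induction levP s1 s2 i j with
  | case1 j => simp [levP_zero_right]
  | case2 i => simp [levP_zero_left]
  | case3 i j ih1 ih2 ih3 =>
      simp only [Nat.succ_eq_add_one]
      rw [ih1, ih2, ih3, levP_succ_succ s2 s1 j i]
      by_cases hch : s1.getD i ' ' = s2.getD j ' '
      · rw [if_pos hch, if_pos hch.symm]; omega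
      · have hch2 : ¬ s2.getD j ' ' = s1.getD i ' ' := fun e => hch e.symm
        rw [if_neg hch, if_neg hch2]; omega

-- goB decides "prefix distance ≤ k"
lemma goB_eq (s1 s2 : List Char) (i j k : Nat) :
    goB s1 s2 i j k = decide (levP s1 s2 i j ≤ k) := by
  fun_induction goB s1 s2 i j k with
  | case1 i j k h ih =>
      obtain ⟨hi, hj, hc⟩ := h
      obtain ⟨i', rfl⟩ : ∃ i', i = i' + 1 := ⟨i - 1, by omega⟩
      obtain ⟨j', rfl⟩ : ∃ j', j = j' + 1 := ⟨j - 1, by omega⟩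
      simp only [Nat.add_sub_cancel] at hc ih ⊢
      rw [ih, levP_trim s1 s2 i' j' hc]
  | case2 j k h =>
      rw [levP_zero_left]
  | case3 i k h1 h2 =>
      rw [levP_zero_right]
  | case4 i j h hi hj =>
      obtain ⟨i', rfl⟩ : ∃ i', i = i' + 1 := ⟨i - 1, by omega⟩
      obtain ⟨j', rfl⟩ : ∃ j', j = j' + 1 := ⟨j - 1, by omega⟩
      simp only [Nat.add_sub_cancel] at h
      have hne : ¬ s1.getD i' ' ' = s2.getD j' ' ' := fun hc => h ⟨by omega, by omega, hc⟩
      rw [levP_succ_succ, if_neg hne]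
      symm
      simp only [decide_eq_false_iff_not]
      omega
  | case5 i j k h hi hj hk ih1 ih2 ih3 =>
      obtain ⟨i', rfl⟩ : ∃ i', i = i' + 1 := ⟨i - 1, by omega⟩
      obtain ⟨j', rfl⟩ : ∃ j', j = j' + 1 := ⟨j - 1, by omega⟩
      simp only [Nat.add_sub_cancel] at h ih1 ih2 ih3 ⊢
      have hne : ¬ s1.getD i' ' ' = s2.getD j' ' ' := fun hc => h ⟨by omega, by omega, hc⟩
      rw [ih1, ih2, ih3, levP_succ_succ, if_neg hne]
      by_cases h1 : levP s1 s2 i' (j' + 1) ≤ k - 1 <;>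
        by_cases h2 : levP s1 s2 (i' + 1) j' ≤ k - 1 <;>
          by_cases h3 : levP s1 s2 i' j' ≤ k - 1 <;>
            simp [h1, h2, h3] <;> omega

lemma drop_succ_of_cons {A : Type} {l rest : List A} {a : A} {j : Nat}
    (h : a :: rest = l.drop j) : rest = l.drop (j + 1) := by
  have h2 := congrArg (List.drop 1) h
  simp [List.drop_drop] at h2
  simpa [Nat.add_comm] using h2

-- the inner loop of A builds row i+1 of the DP table
lemma inner_inv (s1 s2 : List Char) (i : Nat) :
    ∀ (rest : List Char) (j : Nat) (cur : List Nat),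
      rest = s2.drop j → j + rest.length = s2.length →
      cur = (List.range (j + 1)).map (fun t => levP s1 s2 (i + 1) t) →
      rest.foldl
          (levInnerF ((List.range (s2.length + 1)).map (fun t => levP s1 s2 i t)) (s1.getD i ' '))
          (cur, j)
        = ((List.range (s2.length + 1)).map (fun t => levP s1 s2 (i + 1) t), s2.length) := by
  intro rest
  induction rest with
  | nil =>
      intro j cur _ hlen hcur
      simp at hlen
      subst hlen
      subst hcur
      rfl
  | cons c2 rest ih =>
      intro j cur hrest hlen hcur
      have hj : j < s2.length := by simp at hlen; omega
      have hc2 : s2.getD j ' ' = c2 := by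
        have : (s2.drop j).getD 0 ' ' = c2 := by rw [← hrest]; rfl
        simpa [List.getD, List.getElem?_drop] using this
      rw [List.foldl_cons]
      have hstep : levInnerF ((List.range (s2.length + 1)).map (fun t => levP s1 s2 i t))
          (s1.getD i ' ') (cur, j) c2
          = ((List.range (j + 1 + 1)).map (fun t => levP s1 s2 (i + 1) t), j + 1) := by
        simp only [levInnerF]
        have hins : ((List.range (s2.length + 1)).map (fun t => levP s1 s2 i t)).getD (j + 1) 0
            = levP s1 s2 i (j + 1) := PySem.List.getD_map_range _ _ _ 0 (by omega)
        have hsub : ((List.range (s2.length + 1)).map (fun t => levP s1 s2 i t)).getD j 0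
            = levP s1 s2 i j := PySem.List.getD_map_range _ _ _ 0 (by omega)
        have hdel : cur.getD j 0 = levP s1 s2 (i + 1) j := by
          rw [hcur]; exact PySem.List.getD_map_range _ _ _ 0 (by omega)
        rw [hins, hsub, hdel, ← hc2, ← levP_succ_succ, hcur]
        rw [List.range_succ (n := j + 1), List.map_append]
        rfl
      rw [hstep]
      exact ih (j + 1) _ (drop_succ_of_cons hrest) (by simp at hlen ⊢; omega) rfl

-- the outer loop of A builds the last DP row
lemma outer_inv (s1 s2 : List Char) :
    ∀ (rest : List Char) (i : Nat) (prev : List Nat),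
      rest = s1.drop i → i + rest.length = s1.length →
      prev = (List.range (s2.length + 1)).map (fun t => levP s1 s2 i t) →
      rest.foldl (levOuterF s2) (prev, i)
        = ((List.range (s2.length + 1)).map (fun t => levP s1 s2 s1.length t), s1.length) := by
  intro rest
  induction rest with
  | nil =>
      intro i prev _ hlen hprev
      simp at hlen
      subst hlen
      subst hprev
      rfl
  | cons c1 rest ih =>
      intro i prev hrest hlen hprev
      have hi : i < s1.length := by simp at hlen; omega
      have hc1 : s1.getD i ' ' = c1 := by
        have : (s1.drop i).getD 0 ' ' = c1 := by rw [← hrest]; rfl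
        simpa [List.getD, List.getElem?_drop] using this
      rw [List.foldl_cons]
      have hstep : levOuterF s2 (prev, i) c1
          = ((List.range (s2.length + 1)).map (fun t => levP s1 s2 (i + 1) t), i + 1) := by
        simp only [levOuterF]
        rw [hprev, ← hc1]
        rw [inner_inv s1 s2 i s2 0 ([i + 1]) (by simp) (by simp) (by
          simp [levP_zero_right])]
      rw [hstep]
      exact ih (i + 1) _ (drop_succ_of_cons hrest) (by simp at hlen ⊢; omega) rfl

-- A's levenshtein_distance computes levP at the full lengths
lemma levDistA_noswap (s1 s2 : List Char) (h : ¬ s1.length < s2.length) :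
    levDistA s1 s2 = levP s1 s2 s1.length s2.length := by
  unfold levDistA
  rw [if_neg h]
  by_cases hm : s2.length = 0
  · rw [if_pos hm, hm, levP_zero_right]
  · rw [if_neg hm]
    rw [outer_inv s1 s2 s1 0 _ (by simp) (by simp) (by
      simp [levP_zero_left])]
    simp only []
    rw [List.range_succ, List.map_append]
    simp

lemma levDistA_eq (s1 s2 : List Char) :
    levDistA s1 s2 = levP s1 s2 s1.length s2.length := by
  by_cases h : s1.length < s2.length
  · unfold levDistA
    rw [if_pos h, levDistA_noswap s2 s1 (by omega), levP_symm]
  · exact levDistA_noswap s1 s2 h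

-- ===== VERDICT (by name: the statement is the Claim_ definition above) =====
theorem is_similar_domain_py_spec : Claim_equal_is_similar_domain_py := by
  intro domain1 domain2 _
  unfold Spec_is_similar_domain_py is_similar_domain_py is_similar_domain_py_alt
  simp only []
  split
  · rfl
  · rw [goB_eq, levDistA_eq]
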